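-- pv_equiv track=rewrite | github.com/BoboTiG/ebook-reader-dict | wikidict/user_functions.py | extract_keywords_from
-- ===== SOURCE A (Python) =====
-- from collections import defaultdict
--
-- def extract_keywords_from(parts: list[str]) -> defaultdict[str, str]:
--     """
--     Given a list of strings, extract strings containing an equal sign ("=").
--
--     Return a *defaultdict(str)* with key=value extracted from the original list.
--
--     The left part of the sign is used as the dict key and the right part as the value.
--     When a string contains the sign, it is removed from the original list.
--
--         >>> extract_keywords_from([])
--         defaultdict(<class 'str'>, {})
--         >>> extract_keywords_from(["foo"])
--         defaultdict(<class 'str'>, {})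
--         >>> extract_keywords_from(["foo", "bar=baz"])
--         defaultdict(<class 'str'>, {'bar': 'baz'})
--         >>> extract_keywords_from(["foo", "bar=baz=ouf"])
--         defaultdict(<class 'str'>, {'bar': 'baz=ouf'})
--         >>> extract_keywords_from(["foo", "bar = baz=ouf"])
--         defaultdict(<class 'str'>, {'bar': 'baz=ouf'})
--         >>> extract_keywords_from(["foo", "<span style='font-variant:small-caps'>xix</span><sup>e</sup> s."])
--         defaultdict(<class 'str'>, {})
--         >>> extract_keywords_from(["foo", "À partir du <span style='font-variant:small-caps'>xix</span><sup>e</sup> siècle"])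
--         defaultdict(<class 'str'>, {})
--         >>> extract_keywords_from(["foo", "bar='baz'"])
--         defaultdict(<class 'str'>, {'bar': "'baz'"})
--     """
--     data = defaultdict(str)
--     for part in parts.copy():
--         if "=" in part:
--             key, value = part.split("=", 1)
--
--             # Prevent splitting such parts:
--             #   "<span style='font-variant:small-caps'>xix</span><sup>e</sup> s.".
--             #   "À partir du <span style='font-variant:small-caps'>xix</span><sup>e</sup> siècle".
--             if key.endswith("<span style"):
--                 continue
--
--             data[key.strip()] = value.strip()
--             parts.pop(parts.index(part))
--     return data
-- ===== SOURCE B (Python) =====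
-- from collections import defaultdict
--
--
-- def extract_keywords_from(parts: list[str]) -> defaultdict[str, str]:
--     data = defaultdict(str)
--     kept = []
--     for part in parts:
--         if "=" in part:
--             key, value = part.split("=", 1)
--             if not key.endswith("<span style"):
--                 data[key.strip()] = value.strip()
--                 continue
--         kept.append(part)
--     parts[:] = kept
--     return data
-- ===== Notes on version B (the rewrite author's own statement) =====
-- stated objective: alternative
-- what changed: Replaces the iterate-over-a-copy loop that mutates the original list via parts.index/parts.pop with a single forward pass that builds the dict while accumulating the kept elements into a fresh list assigned back with parts[:] = kept.
import Mathlib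
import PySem

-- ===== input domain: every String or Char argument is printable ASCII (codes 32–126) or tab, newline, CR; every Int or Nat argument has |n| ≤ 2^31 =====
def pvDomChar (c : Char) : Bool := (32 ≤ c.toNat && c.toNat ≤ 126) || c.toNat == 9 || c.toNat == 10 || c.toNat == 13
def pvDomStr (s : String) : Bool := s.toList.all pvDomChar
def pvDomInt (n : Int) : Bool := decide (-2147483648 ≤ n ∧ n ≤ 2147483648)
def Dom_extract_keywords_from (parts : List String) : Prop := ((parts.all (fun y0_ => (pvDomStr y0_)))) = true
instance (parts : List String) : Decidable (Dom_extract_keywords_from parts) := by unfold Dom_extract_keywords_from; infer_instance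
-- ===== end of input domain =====

-- B: one forward pass building the dict and the kept-list together, instead of A's
-- iterate-over-a-copy loop that removes matched items from `parts` via index/pop.
-- Equivalence is proved about the RETURN value only; both Pythons also mutate `parts`
-- identically (A pops matched items one by one, B reassigns parts[:] = kept).

-- ===== PORT A =====
def extract_keywords_from (parts : List String) : List (String × String) :=
  (parts.foldl (fun (st : PySem.Dict String String × List String) part =>
    if PySem.Str.isIn "=" part then
      match PySem.Str.splitMax? part "=" 1 with
      | some (key :: value :: _) =>
        if PySem.Str.endswith key "<span style" then st
        else
          (st.1.insert (PySem.Str.strip key) (PySem.Str.strip value),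
           match PySem.List.index? st.2 part with
           | some i =>
             match PySem.List.pop? st.2 (i : Int) with
             | some r => r.2
             | none => st.2
           | none => st.2)
      | _ => st
    else st) (PySem.Dict.empty, parts)).1.items

-- ===== PORT B =====
def extract_keywords_from_alt (parts : List String) : List (String × String) :=
  (parts.foldl (fun (st : PySem.Dict String String × List String) part =>
    if PySem.Str.isIn "=" part then
      -- `key, value = part.split("=", 1)`: with "=" in part the split has exactly 2 pieces;
      -- the length guard only makes the destructuring total
      let ps := (PySem.Str.splitMax? part "=" 1).getD []
      let key := ps.headD ""
      let value := (ps.drop 1).headD ""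
      if 2 ≤ ps.length then
        if PySem.Str.endswith key "<span style" then (st.1, st.2 ++ [part])
        else (st.1.insert (PySem.Str.strip key) (PySem.Str.strip value), st.2)
      else (st.1, st.2 ++ [part])
    else (st.1, st.2 ++ [part])) (PySem.Dict.empty, [])).1.items

-- ===== PRECONDITION & SPEC =====
def Spec_extract_keywords_from (parts : List String) (out : List (String × String)) : Prop := out = extract_keywords_from_alt parts
instance (parts : List String) (out : List (String × String)) : Decidable (Spec_extract_keywords_from parts out) := by unfold Spec_extract_keywords_from; infer_instance

-- ===== CLAIM (what is proved, stated in full; the proofs are below) =====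
def Claim_equal_extract_keywords_from : Prop := ∀ (parts : List String), Dom_extract_keywords_from parts → Spec_extract_keywords_from parts (extract_keywords_from parts)

-- ===== LEMMAS AND PROOFS =====
-- both folds' dict component evolves by the same part-only step
def pvStep (d : PySem.Dict String String) (part : String) : PySem.Dict String String :=
  if PySem.Str.isIn "=" part then
    match PySem.Str.splitMax? part "=" 1 with
    | some (key :: value :: _) =>
      if PySem.Str.endswith key "<span style" then d
      else d.insert (PySem.Str.strip key) (PySem.Str.strip value)
    | _ => d
  else d

theorem fold_fst_eq {α β γ : Type} (f : β × γ → α → β × γ) (g : β → α → β)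
    (hfg : ∀ st x, (f st x).1 = g st.1 x) (l : List α) (st : β × γ) :
    (l.foldl f st).1 = l.foldl g st.1 := by
  induction l generalizing st with
  | nil => rfl
  | cons x xs ih => rw [List.foldl_cons, List.foldl_cons, ih, hfg]

theorem stepA_fst (st : PySem.Dict String String × List String) (x : String) :
    ((fun (st : PySem.Dict String String × List String) part =>
      if PySem.Str.isIn "=" part then
        match PySem.Str.splitMax? part "=" 1 with
        | some (key :: value :: _) =>
          if PySem.Str.endswith key "<span style" then st
          else
            (st.1.insert (PySem.Str.strip key) (PySem.Str.strip value),
             match PySem.List.index? st.2 part with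
             | some i =>
               match PySem.List.pop? st.2 (i : Int) with
               | some r => r.2
               | none => st.2
             | none => st.2)
        | _ => st
      else st) st x).1 = pvStep st.1 x := by
  unfold pvStep
  by_cases h : PySem.Chars.isIn ['='] x.toList = true
  · rcases hs : PySem.Str.splitMax? x "=" 1 with _ | ⟨_ | ⟨k, _ | ⟨v, rest⟩⟩⟩ <;>
      simp [h, hs] <;> split <;> simp
  · simp [h]

theorem stepB_fst (st : PySem.Dict String String × List String) (x : String) :
    ((fun (st : PySem.Dict String String × List String) part =>
      if PySem.Str.isIn "=" part then
        let ps := (PySem.Str.splitMax? part "=" 1).getD []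
        let key := ps.headD ""
        let value := (ps.drop 1).headD ""
        if 2 ≤ ps.length then
          if PySem.Str.endswith key "<span style" then (st.1, st.2 ++ [part])
          else (st.1.insert (PySem.Str.strip key) (PySem.Str.strip value), st.2)
        else (st.1, st.2 ++ [part])
      else (st.1, st.2 ++ [part])) st x).1 = pvStep st.1 x := by
  unfold pvStep
  by_cases h : PySem.Chars.isIn ['='] x.toList = true
  · rcases hs : PySem.Str.splitMax? x "=" 1 with _ | ⟨_ | ⟨k, _ | ⟨v, rest⟩⟩⟩ <;>
      simp [h, hs] <;> split <;> simp
  · simp [h]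

-- ===== VERDICT (by name: the statement is the Claim_ definition above) =====
theorem extract_keywords_from_spec : Claim_equal_extract_keywords_from := by
  intro parts _
  unfold Spec_extract_keywords_from extract_keywords_from extract_keywords_from_alt
  rw [fold_fst_eq _ pvStep stepA_fst, fold_fst_eq _ pvStep stepB_fst]
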